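-- pv_equiv track=rewrite | github.com/mirunasav/Savin_Miruna_Python | Lab2/main.py | spectators_who_cannot_see
-- ===== SOURCE A (Python) =====
-- def spectators_who_cannot_see(matrix):
--     num_rows = len(matrix)
--
--     if num_rows <= 1:
--         return []
--
--     num_columns = len(matrix[0])
--
--     sad_spectators = []
--
--     for row_of_spectator in range(1, num_rows):
--         for j in range(num_columns):
--             for row_in_front_of_spectator in range(row_of_spectator):
--                 if matrix[row_in_front_of_spectator][j] > matrix[row_of_spectator][j]:
--                     sad_spectators.append((row_of_spectator, j))
--                     break
--
--     return sad_spectators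
-- ===== SOURCE B (Python) =====
-- def spectators_who_cannot_see(matrix):
--     if len(matrix) <= 1:
--         return []
--     num_columns = len(matrix[0])
--     maxes = list(matrix[0])
--     sad_spectators = []
--     for r in range(1, len(matrix)):
--         row = matrix[r]
--         sad_spectators.extend((r, j) for j in range(num_columns) if maxes[j] > row[j])
--         maxes = [max(maxes[j], row[j]) for j in range(num_columns)]
--     return sad_spectators
-- ===== Notes on version B (the rewrite author's own statement) =====
-- stated objective: faster
-- what changed: Replaces the inner scan over all rows in front of each spectator by a running per-column maximum of the rows already seen, so each cell is inspected once.
import Mathlib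
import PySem

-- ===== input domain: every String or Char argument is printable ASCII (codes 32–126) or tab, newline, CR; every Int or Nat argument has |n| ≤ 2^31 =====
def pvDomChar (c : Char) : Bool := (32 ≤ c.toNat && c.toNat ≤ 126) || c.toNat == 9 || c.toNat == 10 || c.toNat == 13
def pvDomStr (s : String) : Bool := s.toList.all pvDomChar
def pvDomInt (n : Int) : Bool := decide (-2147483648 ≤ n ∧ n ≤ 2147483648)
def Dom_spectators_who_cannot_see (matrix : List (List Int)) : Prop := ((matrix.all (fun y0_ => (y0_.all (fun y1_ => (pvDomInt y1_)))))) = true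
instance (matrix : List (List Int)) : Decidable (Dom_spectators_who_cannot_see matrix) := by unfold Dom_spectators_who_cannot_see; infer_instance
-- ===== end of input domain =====

-- B replaces A's per-spectator scan of all rows in front by a running per-column maximum (one pass over the matrix).

-- matrix[i][j]; inside Pre_ all accessed indices are in range, so the default is never returned
def pvCell (matrix : List (List Int)) (i j : Nat) : Int := (matrix.getD i []).getD j 0

-- ===== PORT A =====
def spectators_who_cannot_see (matrix : List (List Int)) : List (Int × Int) :=
  let numRows := matrix.length
  if numRows ≤ 1 then []
  else
    let numColumns := (matrix.getD 0 []).length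
    (List.range' 1 (numRows - 1)).foldl (fun sad r =>
      (List.range numColumns).foldl (fun sad j =>
        -- 'for i in range(r): if m[i][j] > m[r][j]: append; break' appends once iff some i<r blocks
        if (List.range r).any (fun i => pvCell matrix i j > pvCell matrix r j)
        then sad ++ [((r : Int), (j : Int))] else sad) sad) []

-- ===== PORT B =====
def spectators_who_cannot_see_alt (matrix : List (List Int)) : List (Int × Int) :=
  if matrix.length ≤ 1 then []
  else
    let numColumns := (matrix.getD 0 []).length
    ((List.range' 1 (matrix.length - 1)).foldl
      (fun (st : List Int × List (Int × Int)) r =>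
        let row := matrix.getD r []
        ((List.range numColumns).map (fun j => max (st.1.getD j 0) (row.getD j 0)),
         st.2 ++ (List.range numColumns).filterMap (fun j =>
           if st.1.getD j 0 > row.getD j 0 then some ((r : Int), (j : Int)) else none)))
      (matrix.getD 0 [], [])).2

-- ===== PRECONDITION & SPEC =====
-- Pre_ excludes ragged matrices in which some row is shorter than the first row: there Python A
-- (and Python B) raise IndexError.
def Pre_spectators_who_cannot_see (matrix : List (List Int)) : Prop :=
  ∀ row ∈ matrix, (matrix.headD []).length ≤ row.length
instance (matrix : List (List Int)) : Decidable (Pre_spectators_who_cannot_see matrix) := by unfold Pre_spectators_who_cannot_see; infer_instance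

def pvWitness_spectators_who_cannot_see : List (List Int) := [[1, 2], [3, 1]]

def Spec_spectators_who_cannot_see (matrix : List (List Int)) (out : List (Int × Int)) : Prop := out = spectators_who_cannot_see_alt matrix
instance (matrix : List (List Int)) (out : List (Int × Int)) : Decidable (Spec_spectators_who_cannot_see matrix out) := by unfold Spec_spectators_who_cannot_see; infer_instance

-- ===== CLAIM (what is proved, stated in full; the proofs are below) =====
def Claim_equal_spectators_who_cannot_see : Prop := ∀ (matrix : List (List Int)), Dom_spectators_who_cannot_see matrix → Pre_spectators_who_cannot_see matrix → Spec_spectators_who_cannot_see matrix (spectators_who_cannot_see matrix)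

-- ===== LEMMAS AND PROOFS =====

-- running maximum of column j over rows 0..r-1 (rows already seen; r = 0 degenerates to row 0)
def pvColMax (matrix : List (List Int)) (r j : Nat) : Int :=
  (List.range r).foldl (fun acc i => max acc (pvCell matrix i j)) (pvCell matrix 0 j)

theorem pvColMax_succ (matrix : List (List Int)) (r j : Nat) :
    pvColMax matrix (r + 1) j = max (pvColMax matrix r j) (pvCell matrix r j) := by
  simp [pvColMax, List.range_succ]

theorem pvColMax_one (matrix : List (List Int)) (j : Nat) :
    pvColMax matrix 1 j = pvCell matrix 0 j := by
  simp [pvColMax, List.range_succ]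

-- A's break-scan finds a blocker iff the running maximum exceeds the spectator's height
theorem pvAny_eq_colMax (matrix : List (List Int)) (r j : Nat) (t : Int) :
    ((List.range (r + 1)).any (fun i => pvCell matrix i j > t))
      = decide (pvColMax matrix (r + 1) j > t) := by
  induction r with
  | zero => simp [pvColMax_one]
  | succ r ih =>
      rw [List.range_succ, List.any_append, ih, pvColMax_succ matrix (r + 1) j]
      simp [Bool.or_comm]

theorem pvFilter_map_eq_filterMap {β : Type} (l : List Nat) (p : Nat → Bool) (f : Nat → β) :
    (l.filter p).map f = l.filterMap (fun x => if p x then some (f x) else none) := by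
  induction l with
  | nil => rfl
  | cons x xs ih =>
      by_cases h : p x <;> simp [h, ih]

-- the loop invariant of B: after rows 1..k, maxes is the column maximum over rows 0..k
-- and the collected pairs are exactly those A collects
theorem pvMain (matrix : List (List Int)) (nc : Nat) :
    ∀ k : Nat,
      (∀ j < nc,
        (((List.range' 1 k).foldl
          (fun (st : List Int × List (Int × Int)) r =>
            let row := matrix.getD r []
            ((List.range nc).map (fun j => max (st.1.getD j 0) (row.getD j 0)),
             st.2 ++ (List.range nc).filterMap (fun j =>
               if st.1.getD j 0 > row.getD j 0 then some ((r : Int), (j : Int)) else none)))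
          (matrix.getD 0 [], [])).1.getD j 0) = pvColMax matrix (k + 1) j)
      ∧ (((List.range' 1 k).foldl
          (fun (st : List Int × List (Int × Int)) r =>
            let row := matrix.getD r []
            ((List.range nc).map (fun j => max (st.1.getD j 0) (row.getD j 0)),
             st.2 ++ (List.range nc).filterMap (fun j =>
               if st.1.getD j 0 > row.getD j 0 then some ((r : Int), (j : Int)) else none)))
          (matrix.getD 0 [], [])).2)
        = (List.range' 1 k).foldl (fun sad r =>
            (List.range nc).foldl (fun sad j =>
              if (List.range r).any (fun i => pvCell matrix i j > pvCell matrix r j)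
              then sad ++ [((r : Int), (j : Int))] else sad) sad) [] := by
  intro k
  induction k with
  | zero =>
      refine ⟨fun j hj => ?_, rfl⟩
      simp [pvColMax_one, pvCell]
  | succ k ih =>
      have hrange : List.range' 1 (k + 1) = List.range' 1 k ++ [1 + k] := by
        have := List.range'_concat (s := 1) (n := k) (step := 1)
        simpa using this
      constructor
      · intro j hj
        rw [hrange, List.foldl_append]
        simp only [List.foldl_cons, List.foldl_nil]
        rw [List.getD_eq_getElem?_getD, List.getElem?_map]
        simp only [List.getElem?_range, hj]
        simp only [Option.map_some, Option.getD_some]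
        rw [ih.1 j hj]
        show max (pvColMax matrix (k + 1) j) (pvCell matrix (1 + k) j) = pvColMax matrix (k + 1 + 1) j
        rw [Nat.add_comm 1 k]
        exact (pvColMax_succ matrix (k + 1) j).symm
      · rw [hrange, List.foldl_append, List.foldl_append]
        simp only [List.foldl_cons, List.foldl_nil]
        rw [ih.2]
        -- A's inner loop over columns is an append-if fold
        rw [PySem.List.foldl_append_if
              (p := fun j => (List.range (1 + k)).any
                (fun i => pvCell matrix i j > pvCell matrix (1 + k) j))
              (f := fun j => (((1 + k : Nat) : Int), (j : Int)))]
        rw [pvFilter_map_eq_filterMap]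
        congr 1
        apply List.filterMap_congr
        intro j hj
        have hjlt : j < nc := List.mem_range.mp hj
        rw [ih.1 j hjlt]
        have h1k : (1 + k) = k + 1 := Nat.add_comm 1 k
        rw [h1k, pvAny_eq_colMax matrix k j]
        show (if pvColMax matrix (k + 1) j > pvCell matrix (k + 1) j then some (((k + 1 : Nat) : Int), (j : Int)) else none)
          = (if decide (pvColMax matrix (k + 1) j > pvCell matrix (k + 1) j) = true then some (((k + 1 : Nat) : Int), (j : Int)) else none)
        simp

-- ===== VERDICT (by name: the statement is the Claim_ definition above) =====
theorem spectators_who_cannot_see_spec : Claim_equal_spectators_who_cannot_see := by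
  intro matrix _ _
  unfold Spec_spectators_who_cannot_see spectators_who_cannot_see spectators_who_cannot_see_alt
  by_cases h : matrix.length ≤ 1
  · simp [h]
  · simp only [h, if_false]
    exact ((pvMain matrix (matrix.getD 0 []).length (matrix.length - 1)).2).symm
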